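-- pv_equiv track=rewrite | github.com/weichert/squadvault | scripts/_patch_ops_fix_pairing_gate_cta_placement_v3.py | inject_after_allowlist_in_fail_path
-- ===== SOURCE A (Python) =====
-- FAIL_ANCHOR = 'FAIL: patcher/wrapper pairing gate failed.'
--
-- ALLOWLIST_ANCHOR = 'scripts/patch_pair_allowlist_v1.txt'
--
-- CTA_ECHO_BLOCK = """\
-- echo
-- echo "=== NEXT: Fix patcher/wrapper pairing failures ==="
-- echo "1) Add the missing pair(s): scripts/patch_*.sh <-> scripts/_patch_*.py"
-- echo "2) Then regenerate the allowlist (if still needed):"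
-- echo "   bash scripts/patch_ops_rewrite_patch_pair_allowlist_v2.sh"
-- echo "NOTE: scripts/patch_pair_allowlist_v1.txt is auto-generated; manual edits will be overwritten."
-- echo
-- """
--
-- def inject_after_allowlist_in_fail_path(raw: str) -> tuple[str, bool]:
--     lines = raw.splitlines(keepends=True)
--
--     # Find FAIL line
--     idx_fail = None
--     for i, line in enumerate(lines):
--         if FAIL_ANCHOR in line:
--             idx_fail = i
--             break
--     if idx_fail is None:
--         return raw, False
--
--     # Find allowlist path echo line AFTER FAIL
--     idx_allow = None
--     for j in range(idx_fail, len(lines)):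
--         if ALLOWLIST_ANCHOR in lines[j]:
--             idx_allow = j
--             break
--     if idx_allow is None:
--         return raw, False
--
--     out: list[str] = []
--     for k, line in enumerate(lines):
--         out.append(line)
--         if k == idx_allow:
--             out.append(CTA_ECHO_BLOCK)
--
--     return "".join(out), True
-- ===== SOURCE B (Python) =====
-- FAIL_ANCHOR = 'FAIL: patcher/wrapper pairing gate failed.'
--
-- ALLOWLIST_ANCHOR = 'scripts/patch_pair_allowlist_v1.txt'
--
-- CTA_ECHO_BLOCK = """\
-- echo
-- echo "=== NEXT: Fix patcher/wrapper pairing failures ==="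
-- echo "1) Add the missing pair(s): scripts/patch_*.sh <-> scripts/_patch_*.py"
-- echo "2) Then regenerate the allowlist (if still needed):"
-- echo "   bash scripts/patch_ops_rewrite_patch_pair_allowlist_v2.sh"
-- echo "NOTE: scripts/patch_pair_allowlist_v1.txt is auto-generated; manual edits will be overwritten."
-- echo
-- """
--
--
-- def inject_after_allowlist_in_fail_path(raw: str) -> tuple[str, bool]:
--     # Single pass: track whether the FAIL line has been seen and whether the
--     # CTA block has already been inserted; no index bookkeeping, no rebuild pass.
--     out: list[str] = []
--     seen_fail = False
--     inserted = False
--     for line in raw.splitlines(keepends=True):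
--         out.append(line)
--         if FAIL_ANCHOR in line:
--             seen_fail = True
--         if seen_fail and not inserted and ALLOWLIST_ANCHOR in line:
--             out.append(CTA_ECHO_BLOCK)
--             inserted = True
--     if inserted:
--         return "".join(out), True
--     return raw, False
-- ===== Notes on version B (the rewrite author's own statement) =====
-- stated objective: simpler
-- what changed: Replaces A's three separate passes (find the FAIL line index, find the allowlist line index from there, rebuild with an enumerate loop) by one traversal of the lines that appends to the output while maintaining seen_fail/inserted flags.
import Mathlib
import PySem

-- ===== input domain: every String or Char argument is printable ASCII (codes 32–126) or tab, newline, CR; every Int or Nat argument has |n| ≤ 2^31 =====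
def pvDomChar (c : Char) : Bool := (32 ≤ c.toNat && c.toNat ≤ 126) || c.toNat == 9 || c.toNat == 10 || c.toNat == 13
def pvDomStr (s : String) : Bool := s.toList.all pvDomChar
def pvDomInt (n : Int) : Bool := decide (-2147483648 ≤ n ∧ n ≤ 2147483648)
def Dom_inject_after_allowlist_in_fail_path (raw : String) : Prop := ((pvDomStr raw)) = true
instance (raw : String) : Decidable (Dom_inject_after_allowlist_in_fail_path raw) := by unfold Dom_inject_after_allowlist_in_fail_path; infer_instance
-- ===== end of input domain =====

-- B replaces A's three passes (find FAIL index, find allowlist index, rebuild) by a single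
-- flag-tracking traversal of the lines; equivalence of the return values is proved below.


-- module constants (shared by both Pythons)
def pvFailAnchor : List Char := "FAIL: patcher/wrapper pairing gate failed.".toList

def pvAllowAnchor : List Char := "scripts/patch_pair_allowlist_v1.txt".toList

def pvCtaBlock : List Char :=
  ("echo\necho \"=== NEXT: Fix patcher/wrapper pairing failures ===\"\necho \"1) Add the missing pair(s): scripts/patch_*.sh <-> scripts/_patch_*.py\"\necho \"2) Then regenerate the allowlist (if still needed):\"\necho \"   bash scripts/patch_ops_rewrite_patch_pair_allowlist_v2.sh\"\necho \"NOTE: scripts/patch_pair_allowlist_v1.txt is auto-generated; manual edits will be overwritten.\"\necho\n").toList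

-- raw.splitlines(keepends=True), ported by hand (PySem.splitlines drops the ends):
-- exact on the domain's characters, where the only line breaks are '\n', '\r' and '\r\n'
-- (Python's extra break characters '\v', '\f', '\x1c'-'\x1e', '\x85', … lie outside Dom_).
def pvSplitLinesKeep (cs : List Char) (acc : List Char) : List (List Char) :=
  match cs with
  | [] => if acc.isEmpty then [] else [acc.reverse]
  | '\r' :: '\n' :: rest => (acc.reverse ++ ['\r', '\n']) :: pvSplitLinesKeep rest []
  | '\n' :: rest => (acc.reverse ++ ['\n']) :: pvSplitLinesKeep rest []
  | '\r' :: rest => (acc.reverse ++ ['\r']) :: pvSplitLinesKeep rest []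
  | c :: rest => pvSplitLinesKeep rest (c :: acc)

-- ===== PORT A =====
-- A's two search loops ('for i, line in enumerate(lines): … break' and
-- 'for j in range(idx_fail, len(lines)): …'): first index ≥ j whose line satisfies p.
def pvFindFrom (p : List Char → Bool) (lines : List (List Char)) (j : Nat) : Option Nat :=
  match h : lines[j]? with
  | none => none
  | some l => if p l then some j else pvFindFrom p lines (j + 1)
termination_by lines.length - j
decreasing_by
  have hj : j < lines.length := List.getElem?_eq_some_iff.mp h |>.1
  omega

def inject_after_allowlist_in_fail_path (raw : String) : String × Bool :=
  let lines := pvSplitLinesKeep raw.toList []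
  match pvFindFrom (fun l => PySem.Chars.isIn pvFailAnchor l) lines 0 with
  | none => (raw, false)
  | some idxFail =>
    match pvFindFrom (fun l => PySem.Chars.isIn pvAllowAnchor l) lines idxFail with
    | none => (raw, false)
    | some idxAllow =>
      let out := (PySem.List.enumerate lines 0).foldl
        (fun out kl => (out ++ [kl.2]) ++ (if kl.1 == (idxAllow : Int) then [pvCtaBlock] else [])) []
      (String.ofList (PySem.Chars.join [] out), true)

-- ===== PORT B =====
-- B's single loop: state = (out, seen_fail, inserted).
def pvBLoop (ls : List (List Char)) (out : List (List Char)) (seen ins : Bool) :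
    List (List Char) × Bool :=
  match ls with
  | [] => (out, ins)
  | l :: rest =>
    let out' := out ++ [l]
    let seen' := seen || PySem.Chars.isIn pvFailAnchor l
    if seen' && !ins && PySem.Chars.isIn pvAllowAnchor l then
      pvBLoop rest (out' ++ [pvCtaBlock]) seen' true
    else
      pvBLoop rest out' seen' ins

def inject_after_allowlist_in_fail_path_alt (raw : String) : String × Bool :=
  let r := pvBLoop (pvSplitLinesKeep raw.toList []) [] false false
  if r.2 then (String.ofList (PySem.Chars.join [] r.1), true) else (raw, false)

-- ===== PRECONDITION & SPEC =====
def Spec_inject_after_allowlist_in_fail_path (raw : String) (out : String × Bool) : Prop := out = inject_after_allowlist_in_fail_path_alt raw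
instance (raw : String) (out : String × Bool) : Decidable (Spec_inject_after_allowlist_in_fail_path raw out) := by unfold Spec_inject_after_allowlist_in_fail_path; infer_instance

-- ===== CLAIM (what is proved, stated in full; the proofs are below) =====
def Claim_equal_inject_after_allowlist_in_fail_path : Prop := ∀ (raw : String), Dom_inject_after_allowlist_in_fail_path raw → Spec_inject_after_allowlist_in_fail_path raw (inject_after_allowlist_in_fail_path raw)

-- ===== LEMMAS AND PROOFS =====

-- once inserted, B's loop only copies the remaining lines
theorem pvBLoop_inserted (ls : List (List Char)) (out : List (List Char)) (seen : Bool) :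
    pvBLoop ls out seen true = (out ++ ls, true) := by
  induction ls generalizing out seen with
  | nil => simp [pvBLoop]
  | cons l rest ih => simp [pvBLoop, ih]

-- after the FAIL line has been seen: insert after the first allowlist line
theorem pvBLoop_seen (ls : List (List Char)) (out : List (List Char)) :
    pvBLoop ls out true false =
      match ls.findIdx? (fun l => PySem.Chars.isIn pvAllowAnchor l) with
      | none => (out ++ ls, false)
      | some j => (out ++ (ls.take (j + 1) ++ [pvCtaBlock] ++ ls.drop (j + 1)), true) := by
  induction ls generalizing out with
  | nil => simp [pvBLoop]
  | cons l rest ih =>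
    by_cases h : PySem.Chars.isIn pvAllowAnchor l
    · simp [pvBLoop, h, pvBLoop_inserted, List.findIdx?_cons]
    · simp only [pvBLoop, Bool.true_or, h, Bool.and_false, if_neg, Bool.false_eq_true,
        not_false_eq_true, ih, List.findIdx?_cons, Bool.and_true, Bool.not_false]
      cases hf : rest.findIdx? (fun l => PySem.Chars.isIn pvAllowAnchor l) with
      | none => simp
      | some j => simp [List.take_succ_cons, List.drop_succ_cons]

-- full characterisation of B's loop from the initial state
theorem pvBLoop_start (ls : List (List Char)) (out : List (List Char)) :
    pvBLoop ls out false false =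
      match ls.findIdx? (fun l => PySem.Chars.isIn pvFailAnchor l) with
      | none => (out ++ ls, false)
      | some i =>
        match (ls.drop i).findIdx? (fun l => PySem.Chars.isIn pvAllowAnchor l) with
        | none => (out ++ ls, false)
        | some j =>
          (out ++ (ls.take (i + j + 1) ++ [pvCtaBlock] ++ ls.drop (i + j + 1)), true) := by
  induction ls generalizing out with
  | nil => simp [pvBLoop]
  | cons l rest ih =>
    by_cases h : PySem.Chars.isIn pvFailAnchor l
    · have hstep : pvBLoop (l :: rest) out false false = pvBLoop (l :: rest) out true false := by
        simp [pvBLoop, h]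
      rw [hstep, pvBLoop_seen]
      simp only [List.findIdx?_cons, h, if_pos, List.drop_zero]
      cases ha : (l :: rest).findIdx? (fun l => PySem.Chars.isIn pvAllowAnchor l) <;> simp
    · simp only [pvBLoop, Bool.false_or, h, Bool.false_and, if_neg,
        Bool.false_eq_true, not_false_eq_true, ih, List.findIdx?_cons]
      cases hf : rest.findIdx? (fun l => PySem.Chars.isIn pvFailAnchor l) with
      | none => simp
      | some i =>
        simp only [Option.map_some, List.drop_succ_cons]
        cases ha : (rest.drop i).findIdx? (fun l => PySem.Chars.isIn pvAllowAnchor l) with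
        | none => simp
        | some j =>
          have e1 : i + 1 + j + 1 = (i + j + 1) + 1 := by omega
          have e2 : i + 1 + j = i + j + 1 := by omega
          simp [e2, List.take_succ_cons]

-- A's index-driven search = findIdx? on the dropped prefix
theorem pvFindFrom_eq (p : List Char → Bool) (lines : List (List Char)) (j : Nat) :
    pvFindFrom p lines j = ((lines.drop j).findIdx? p).map (j + ·) := by
  fun_induction pvFindFrom p lines j with
  | case1 j h =>
    have : lines.length ≤ j := by
      by_contra hc
      simp [List.getElem?_eq_getElem (by omega : j < lines.length)] at h
    simp [List.drop_eq_nil_of_le this]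
  | case2 j l h hp =>
    have hj : j < lines.length := List.getElem?_eq_some_iff.mp h |>.1
    have hd : lines.drop j = lines[j] :: lines.drop (j + 1) := List.drop_eq_getElem_cons hj
    have hl : lines[j] = l := by simpa using List.getElem?_eq_some_iff.mp h |>.2
    rw [hd, hl, List.findIdx?_cons, if_pos hp]
    simp
  | case3 j l h hp ih =>
    have hj : j < lines.length := List.getElem?_eq_some_iff.mp h |>.1
    have hd : lines.drop j = lines[j] :: lines.drop (j + 1) := List.drop_eq_getElem_cons hj
    have hl : lines[j] = l := by simpa using List.getElem?_eq_some_iff.mp h |>.2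
    rw [hd, hl, List.findIdx?_cons, if_neg (by simp [hp]), ih]
    cases (lines.drop (j + 1)).findIdx? p
    · simp
    · simp; omega

-- the enumerate/flatMap body never fires when every index exceeds the target
theorem pvEnumFlatMap_lt (ls : List (List Char)) (s t : Int) (hlt : t < s) :
    (PySem.List.enumerate ls s).flatMap
      (fun kl => [kl.2] ++ (if kl.1 == t then [pvCtaBlock] else [])) = ls := by
  induction ls generalizing s with
  | nil => simp [PySem.List.enumerate_nil]
  | cons l rest ih =>
    rw [PySem.List.enumerate_cons]
    simp only [List.flatMap_cons]
    rw [if_neg (by simp; omega), ih (s + 1) (by omega)]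
    simp

-- the enumerate/flatMap pass inserts the block exactly after index k
theorem pvEnumFlatMap_insert (ls : List (List Char)) (s t : Int) (k : Nat)
    (ht : t = s + k) (hk : k < ls.length) :
    (PySem.List.enumerate ls s).flatMap
      (fun kl => [kl.2] ++ (if kl.1 == t then [pvCtaBlock] else [])) =
      ls.take (k + 1) ++ [pvCtaBlock] ++ ls.drop (k + 1) := by
  induction ls generalizing s k with
  | nil => simp at hk
  | cons l rest ih =>
    rw [PySem.List.enumerate_cons]
    simp only [List.flatMap_cons]
    cases k with
    | zero =>
      rw [if_pos (by simp; omega), pvEnumFlatMap_lt rest (s + 1) t (by omega)]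
      simp
    | succ k =>
      rw [if_neg (by simp; omega), ih (s + 1) k (by omega) (by simpa using hk)]
      simp [List.take_succ_cons, List.drop_succ_cons]

-- rewrite A's foldl into the flatMap form
theorem pvFoldl_enum (lines : List (List Char)) (t : Int) :
    (PySem.List.enumerate lines 0).foldl
      (fun out kl => (out ++ [kl.2]) ++ (if kl.1 == t then [pvCtaBlock] else [])) [] =
      (PySem.List.enumerate lines 0).flatMap
        (fun kl => [kl.2] ++ (if kl.1 == t then [pvCtaBlock] else [])) := by
  have : (fun (out : List (List Char)) (kl : Int × List Char) =>
      (out ++ [kl.2]) ++ (if kl.1 == t then [pvCtaBlock] else [])) =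
      (fun out kl => out ++ ([kl.2] ++ (if kl.1 == t then [pvCtaBlock] else []))) := by
    funext out kl; simp
  rw [this, PySem.List.foldl_append_eq_flatMap]
  simp

-- ===== VERDICT (by name: the statement is the Claim_ definition above) =====
theorem inject_after_allowlist_in_fail_path_spec : Claim_equal_inject_after_allowlist_in_fail_path := by
  intro raw _
  unfold Spec_inject_after_allowlist_in_fail_path
  unfold inject_after_allowlist_in_fail_path inject_after_allowlist_in_fail_path_alt
  rw [pvBLoop_start]
  simp only [pvFindFrom_eq, List.drop_zero, Nat.zero_add, List.nil_append]
  cases hf : (pvSplitLinesKeep raw.toList []).findIdx? (fun l => PySem.Chars.isIn pvFailAnchor l) with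
  | none => simp
  | some i =>
    have hi : i < (pvSplitLinesKeep raw.toList []).length :=
      (List.findIdx?_eq_some_iff_findIdx_eq.mp hf).1
    simp only [Option.map_some]
    cases ha : ((pvSplitLinesKeep raw.toList []).drop i).findIdx?
        (fun l => PySem.Chars.isIn pvAllowAnchor l) with
    | none => simp
    | some j =>
      have hj : j < ((pvSplitLinesKeep raw.toList []).drop i).length :=
        (List.findIdx?_eq_some_iff_findIdx_eq.mp ha).1
      have hij : i + j < (pvSplitLinesKeep raw.toList []).length := by
        simp at hj; omega
      simp only [Option.map_some]
      rw [pvFoldl_enum, pvEnumFlatMap_insert (pvSplitLinesKeep raw.toList []) 0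
        (((i + j : Nat) : Int)) (i + j) (by omega) hij]
      simp
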